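-- pv_equiv track=rewrite | github.com/Katja-Jagd/Graph-neural-networks-for-topology-prediction | scripts/Utils.py | type_from_labels
-- ===== SOURCE A (Python) =====
-- def type_from_labels(label):
--     """
--     Function that determines the protein type from labels
--
--     Dimension of each label:
--     (len_of_longenst_protein_in_batch)
--
--     # Residue class
--     0 = inside cell/cytosol (I)
--     1 = Outside cell/lumen of ER/Golgi/lysosomes (O)
--     2 = periplasm (P)
--     3 = signal peptide (S)
--     4 = alpha membrane (M)
--     5 = beta membrane (B)
--
--     B in the label sequence -> beta
--     I only -> globular
--     Both S and M -> SP + alpha(TM)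
--     M -> alpha(TM)
--     S -> signal peptide
--
--     # Protein type class
--     0 = TM
--     1 = SP + TM
--     2 = SP
--     3 = GLOBULAR
--     4 = BETA
--     """
--
--     if 5 in label:
--         ptype = 4
--
--     elif all(element == 0 for element in label):
--         ptype = 3
--
--     elif 3 in label and 4 in label:
--         ptype = 1
--
--     elif 3 in label:
--        ptype = 2
--
--     elif 4 in label:
--         ptype = 0
--
--     elif all(x == 0 or x == -1 for x in label):
--         ptype = 3
--
--     else:
--         ptype = 5
--
--     return ptype
-- ===== SOURCE B (Python) =====
-- _TABLE = (3, 3, 3, 5, 3, 3, 0, 0, 3, 3, 2, 2, 3, 3, 1, 1,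
--           4, 4, 4, 4, 4, 4, 4, 4, 4, 4, 4, 4, 4, 4, 4, 4)
--
-- def type_from_labels(label):
--     has5 = has3 = has4 = nonzero = other = False
--     for x in label:
--         has5 = has5 or x == 5
--         has3 = has3 or x == 3
--         has4 = has4 or x == 4
--         nonzero = nonzero or x != 0
--         other = other or (x != 0 and x != -1)
--     return _TABLE[has5 * 16 + has3 * 8 + has4 * 4 + nonzero * 2 + other]
-- ===== Notes on version B (the rewrite author's own statement) =====
-- stated objective: alternative
-- what changed: B makes a single pass accumulating five boolean flags (has5, has3, has4, any-nonzero, any-not-in-{0,-1}) and returns the answer by indexing a precomputed 32-entry lookup table with the flag bitmask, replacing A's branch ladder of six repeated list scans.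
import Mathlib
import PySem

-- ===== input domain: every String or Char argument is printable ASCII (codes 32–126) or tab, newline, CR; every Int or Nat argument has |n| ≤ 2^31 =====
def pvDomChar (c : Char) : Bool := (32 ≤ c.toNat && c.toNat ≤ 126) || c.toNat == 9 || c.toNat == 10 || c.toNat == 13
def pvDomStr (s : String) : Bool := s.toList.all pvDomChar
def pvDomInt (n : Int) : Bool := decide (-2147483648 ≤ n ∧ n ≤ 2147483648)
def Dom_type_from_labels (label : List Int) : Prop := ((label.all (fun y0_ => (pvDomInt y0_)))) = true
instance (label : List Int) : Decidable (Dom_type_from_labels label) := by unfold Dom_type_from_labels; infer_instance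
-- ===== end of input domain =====

-- B replaces A's ladder of six repeated scans by one flag-accumulating pass plus a 32-entry lookup table (objective: alternative).

-- ===== PORT A =====
def type_from_labels (label : List Int) : Int :=
  if label.contains 5 then 4
  else if label.all (fun element => element == 0) then 3
  else if label.contains 3 && label.contains 4 then 1
  else if label.contains 3 then 2
  else if label.contains 4 then 0
  else if label.all (fun x => x == 0 || x == -1) then 3
  else 5

-- ===== PORT B =====
def pvTable : List Int :=
  [3, 3, 3, 5, 3, 3, 0, 0, 3, 3, 2, 2, 3, 3, 1, 1,
   4, 4, 4, 4, 4, 4, 4, 4, 4, 4, 4, 4, 4, 4, 4, 4]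

def type_from_labels_alt (label : List Int) : Int :=
  let st := label.foldl
    (fun (f : Bool × Bool × Bool × Bool × Bool) x =>
      (f.1 || x == 5, f.2.1 || x == 3, f.2.2.1 || x == 4,
       f.2.2.2.1 || x != 0, f.2.2.2.2 || (x != 0 && x != -1)))
    (false, false, false, false, false)
  -- _TABLE[idx]: idx < 32 always, so plain indexing with default is exact
  pvTable.getD ((cond st.1 16 0) + (cond st.2.1 8 0) + (cond st.2.2.1 4 0)
    + (cond st.2.2.2.1 2 0) + (cond st.2.2.2.2 1 0)) 0

-- ===== PRECONDITION & SPEC =====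
def Spec_type_from_labels (label : List Int) (out : Int) : Prop := out = type_from_labels_alt label
instance (label : List Int) (out : Int) : Decidable (Spec_type_from_labels label out) := by unfold Spec_type_from_labels; infer_instance

-- ===== CLAIM (what is proved, stated in full; the proofs are below) =====
def Claim_equal_type_from_labels : Prop := ∀ (label : List Int), Dom_type_from_labels label → Spec_type_from_labels label (type_from_labels label)

-- ===== LEMMAS AND PROOFS =====
theorem pvFold_char (label : List Int) (a b c d e : Bool) :
    label.foldl
      (fun (f : Bool × Bool × Bool × Bool × Bool) x =>
        (f.1 || x == 5, f.2.1 || x == 3, f.2.2.1 || x == 4,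
         f.2.2.2.1 || x != 0, f.2.2.2.2 || (x != 0 && x != -1)))
      (a, b, c, d, e)
    = (a || label.any (fun x => x == 5), b || label.any (fun x => x == 3),
       c || label.any (fun x => x == 4), d || label.any (fun x => x != 0),
       e || label.any (fun x => x != 0 && x != -1)) := by
  induction label generalizing a b c d e with
  | nil => simp
  | cons h t ih =>
      simp only [List.foldl_cons, List.any_cons, ih]
      simp [Bool.or_assoc]

-- ===== VERDICT (by name: the statement is the Claim_ definition above) =====
theorem type_from_labels_spec : Claim_equal_type_from_labels := by
  intro label _
  unfold Spec_type_from_labels type_from_labels type_from_labels_alt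
  simp only [pvFold_char, Bool.false_or]
  have hc : ∀ (a : Int), label.contains a = label.any (fun x => x == a) := by
    intro a; simp [List.any_beq']
  have h0 : label.all (fun element => element == 0)
      = !(label.any (fun x => x != 0)) := by
    simp [List.all_eq_not_any_not, bne]
  have h1 : label.all (fun x => x == 0 || x == -1)
      = !(label.any (fun x => x != 0 && x != -1)) := by
    simp [List.all_eq_not_any_not, bne]
  rw [hc 5, hc 3, hc 4, h0, h1]
  rcases label.any (fun x => x == 5) <;> rcases label.any (fun x => x == 3) <;>
    rcases label.any (fun x => x == 4) <;> rcases label.any (fun x => x != 0) <;>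
    rcases label.any (fun x => x != 0 && x != -1) <;> rfl
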